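-- pv_equiv track=rewrite | github.com/Zesunlight/Online-Judge | LeetCodeContest/LCP-30_魔塔游戏.py | magicTower
-- ===== SOURCE A (Python) =====
-- from typing import List
--
-- import heapq
--
-- def magicTower(nums: List[int]) -> int:
--     if sum(nums) < 0:
--         return -1
--
--     change = 0
--     life = 0
--     monster = []
--     for n in nums:
--         if n < 0:
--             heapq.heappush(monster, n)
--
--         life += n
--
--         if life < 0:
--             change += 1
--             life += -heapq.heappop(monster)
--
--     return change
-- ===== SOURCE B (Python) =====
-- from typing import List
--
-- def magicTower(nums: List[int]) -> int:
--     if sum(nums) < 0: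
--         return -1
--     change = 0
--     life = 0
--     negs = []
--     for n in nums:
--         if n < 0:
--             negs = negs + [n]
--         life += n
--         if life < 0:
--             change += 1
--             m = min(negs)
--             negs.remove(m)
--             life -= m
--     return change
-- ===== Notes on version B (the rewrite author's own statement) =====
-- stated objective: simpler
-- what changed: Replaces the binary heap (heapq push/pop) with a plain list of negatives plus a linear min-scan and remove when life drops below zero; no heap machinery needed.
import Mathlib
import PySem

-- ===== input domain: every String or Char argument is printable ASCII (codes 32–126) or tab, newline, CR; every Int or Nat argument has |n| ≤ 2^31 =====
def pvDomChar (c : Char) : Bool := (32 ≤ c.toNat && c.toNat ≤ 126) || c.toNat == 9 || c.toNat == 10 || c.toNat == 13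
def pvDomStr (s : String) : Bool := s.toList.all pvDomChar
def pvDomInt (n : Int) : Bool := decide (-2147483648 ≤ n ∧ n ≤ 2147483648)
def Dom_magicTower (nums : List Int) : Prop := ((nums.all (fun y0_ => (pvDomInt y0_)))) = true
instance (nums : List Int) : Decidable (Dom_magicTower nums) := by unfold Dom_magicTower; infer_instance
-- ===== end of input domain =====

-- B replaces A's binary heap (heapq) with a plain list of the negative values
-- seen so far and a linear min-scan + remove when life drops below zero:
-- simpler, no heap machinery (objective: simpler; same single forward pass).

-- ===== PORT A =====
-- heapq on Int is modelled as a sorted list: heappush = ordered insertion,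
-- heappop = take the head (the minimum). On Int values this is exact: heappop
-- returns the minimum value, and equal Int values are indistinguishable.
-- heappop on an empty heap raises IndexError in Python; that state is
-- unreachable here (life < 0 forces a non-empty monster list), the port keeps
-- the state unchanged there.
def stepA (s : Int × Int × List Int) (n : Int) : Int × Int × List Int :=
  let monster := if n < 0 then List.orderedInsert (· ≤ ·) n s.2.2 else s.2.2
  let life := s.2.1 + n
  if life < 0 then
    match monster with
    | m :: rest => (s.1 + 1, life + (-m), rest)
    | [] => (s.1, life, monster)
  else (s.1, life, monster)

def magicTower (nums : List Int) : Int :=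
  if nums.sum < 0 then -1
  else (nums.foldl stepA (0, 0, [])).1

-- ===== PORT B =====
-- B's loop becomes the obvious structural recursion over the remaining input,
-- with the three loop variables (life, negs; change accumulated as 1 + …) as
-- arguments.  min(negs) raises ValueError on an empty list; unreachable here
-- (life < 0 forces negs nonempty), the recursion just continues there.
def countMoves : List Int → Int → List Int → Int
  | [], _, _ => 0
  | n :: tail, life, negs0 =>
    let negs := if n < 0 then negs0 ++ [n] else negs0
    let life' := life + n
    if life' < 0 then
      match PySem.List.min? negs (fun x => x) with
      | some m => 1 + countMoves tail (life' - m) ((PySem.List.remove? negs m).getD negs)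
      | none => countMoves tail life' negs
    else countMoves tail life' negs

def magicTower_alt (nums : List Int) : Int :=
  if nums.sum < 0 then -1
  else countMoves nums 0 []

-- ===== PRECONDITION & SPEC =====
def Spec_magicTower (nums : List Int) (out : Int) : Prop := out = magicTower_alt nums
instance (nums : List Int) (out : Int) : Decidable (Spec_magicTower nums out) := by unfold Spec_magicTower; infer_instance

-- ===== CLAIM (what is proved, stated in full; the proofs are below) =====
def Claim_equal_magicTower : Prop := ∀ (nums : List Int), Dom_magicTower nums → Spec_magicTower nums (magicTower nums)

-- ===== LEMMAS AND PROOFS =====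

/-- Main invariant: A's fold (sorted heap list `h`) computes `c` plus B's
recursive count on any permutation `negs` of `h`. -/
theorem foldA_eq_countMoves (rest : List Int) :
    ∀ (c life : Int) (h negs : List Int), h.Perm negs → h.Sorted (· ≤ ·) →
      (rest.foldl stepA (c, life, h)).1 = c + countMoves rest life negs := by
  induction rest with
  | nil => intro c life h negs _ _; simp [countMoves]
  | cons n tail ih =>
    intro c life h negs hp hs
    have hstep : ∀ s, (n :: tail).foldl stepA s = tail.foldl stepA (stepA s n) := by
      intro s; simp
    rw [hstep]
    unfold stepA countMoves
    set h' := if n < 0 then List.orderedInsert (· ≤ ·) n h else h with hh'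
    set negs' := if n < 0 then negs ++ [n] else negs with hnegs'
    have hp' : h'.Perm negs' := by
      rw [hh', hnegs']
      split_ifs with hn
      · exact (List.perm_orderedInsert _ n h).trans
          ((hp.cons n).trans (List.perm_append_singleton n negs).symm)
      · exact hp
    have hs' : h'.Sorted (· ≤ ·) := by
      rw [hh']
      split_ifs with hn
      · exact List.Pairwise.orderedInsert n h hs
      · exact hs
    simp only []
    split_ifs with hlife
    · cases hch : h' with
      | nil =>
        have hnn : negs' = [] := List.Perm.eq_nil (by simpa [hch] using hp'.symm)
        rw [hnn]
        simp only [PySem.List.min?]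
        simpa using ih c (life + n) [] [] (List.Perm.refl _) List.Pairwise.nil
      | cons m restH =>
        have hmn : m ∈ negs' := hp'.mem_iff.mp (by simp [hch])
        have hne : negs' ≠ [] := by intro hnil; rw [hnil] at hmn; simp at hmn
        obtain ⟨m', hm'⟩ : ∃ m', PySem.List.min? negs' (fun x => x) = some m' := by
          cases hmm : PySem.List.min? negs' (fun x => x) with
          | none => exact absurd ((PySem.List.min?_eq_none_iff negs' _).mp hmm) hne
          | some v => exact ⟨v, rfl⟩
        have hm'mem : m' ∈ negs' := PySem.List.min?_mem hm'
        have hmin : ∀ y ∈ negs', m' ≤ y := fun y hy => PySem.List.min?_isMin hm' y hy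
        have hm_le : ∀ y ∈ h', m ≤ y := by
          intro y hy
          rw [hch] at hy hs'
          rcases List.mem_cons.mp hy with h1 | h1
          · exact le_of_eq h1.symm
          · exact (List.sorted_cons.mp hs').1 y h1
        have heq : m' = m := le_antisymm (hmin m hmn) (hm_le m' (hp'.symm.mem_iff.mp hm'mem))
        have hrem : PySem.List.remove? negs' m' = some (negs'.erase m') :=
          PySem.List.remove?_eq_some_erase negs' m' hm'mem
        rw [hm']
        dsimp only
        rw [hrem, Option.getD_some]
        have hperm2 : restH.Perm (negs'.erase m') := by
          have h1 : negs'.Perm (m :: negs'.erase m) := List.perm_cons_erase hmn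
          have h2 : (m :: restH).Perm (m :: negs'.erase m) := (hch ▸ hp').trans h1
          simpa [heq] using h2.cons_inv
        have hsort2 : restH.Sorted (· ≤ ·) := by
          simpa using (hch ▸ hs' : (m :: restH).Sorted (· ≤ ·)).tail
        have hIH := ih (c + 1) (life + n + -m) restH (negs'.erase m') hperm2 hsort2
        unfold stepA at hIH
        rw [hIH]
        have harg : life + n + -m = life + n - m' := by rw [heq]; ring
        rw [harg]
        ring
    · exact ih c (life + n) h' negs' hp' hs'

-- ===== VERDICT (by name: the statement is the Claim_ definition above) =====
theorem magicTower_spec : Claim_equal_magicTower := by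
  intro nums _
  unfold Spec_magicTower magicTower magicTower_alt
  split_ifs with h
  · rfl
  · simpa using foldA_eq_countMoves nums 0 0 [] [] (List.Perm.refl _) List.Pairwise.nil
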